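-- pv_equiv track=rewrite | github.com/adrienrougny/neo4j_dm | src/neo4j_dm/utils.py | get_number_and_size_of_clusters
-- ===== SOURCE A (Python) =====
-- def get_number_and_size_of_clusters(list_of_sets):
--     i = 0
--     while i < len(list_of_sets):
--         j = i + 1
--         while j < len(list_of_sets):
--             if list_of_sets[i].intersection(list_of_sets[j]):
--                 list_of_sets[i] = list_of_sets[i].union(list_of_sets[j])
--                 del list_of_sets[j]
--                 j = i + 1
--             else:
--                 j += 1
--         i += 1
--     return len(list_of_sets), [len(set_) for set_ in list_of_sets]
-- ===== SOURCE B (Python) =====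
-- def get_number_and_size_of_clusters(list_of_sets):
--     # One left-to-right pass maintaining an ordered list of pairwise-disjoint clusters:
--     # each incoming set absorbs every cluster it overlaps, landing at the first hit's position.
--     clusters = []
--     for s in list_of_sets:
--         merged = set(s)
--         pos = None
--         kept = []
--         for c in clusters:
--             if merged.isdisjoint(c):
--                 kept.append(c)
--             else:
--                 if pos is None:
--                     pos = len(kept)
--                 merged |= c
--         if pos is None:
--             kept.append(merged)
--         else:
--             kept.insert(pos, merged)
--         clusters = kept
--     return len(clusters), [len(c) for c in clusters]
-- ===== Notes on version B (the rewrite author's own statement) =====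
-- stated objective: alternative
-- what changed: replaces A's destructive nested while-loops (which rescan from the start and delete from the list after every merge) by a single left fold that maintains an ordered list of pairwise-disjoint clusters and merges each incoming set with every cluster it overlaps in one pass
import Mathlib
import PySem

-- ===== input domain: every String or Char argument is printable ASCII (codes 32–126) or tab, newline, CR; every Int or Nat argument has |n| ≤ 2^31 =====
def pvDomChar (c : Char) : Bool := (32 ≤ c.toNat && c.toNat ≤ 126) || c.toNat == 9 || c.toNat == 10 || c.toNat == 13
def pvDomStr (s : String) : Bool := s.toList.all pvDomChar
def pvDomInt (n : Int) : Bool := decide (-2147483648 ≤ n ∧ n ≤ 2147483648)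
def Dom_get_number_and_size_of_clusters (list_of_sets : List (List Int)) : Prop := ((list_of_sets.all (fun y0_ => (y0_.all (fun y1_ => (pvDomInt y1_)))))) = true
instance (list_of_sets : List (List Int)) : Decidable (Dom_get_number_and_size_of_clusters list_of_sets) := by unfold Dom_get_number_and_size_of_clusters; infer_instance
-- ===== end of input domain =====

-- B replaces A's destructive nested rescan loops by one left fold over the sets maintaining
-- ordered pairwise-disjoint clusters (objective: alternative, same worst-case cost).
-- Python A mutates its argument list in place (del/assignment); the equivalence proved here is
-- about the RETURN value only.

-- ===== PORT A =====
-- Python A receives a list of sets (py type list[set[int]]); each set argument arrives here as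
-- its element list, so 'PySem.Set.ofList' at the boundary is the exact set conversion.
-- Inner while loop: indices i (fixed) and j scan; a merge writes the union at i, deletes at j
-- and resets j to i+1.  All reads list_of_sets[i]/[j] happen with the index in range, so getD
-- is exact.
def pvInner (fuel : Nat) (i j : Nat) (xs : List (List Int)) : List (List Int) :=
  match fuel with
  | 0 => xs
  | fuel + 1 =>
    if j < xs.length then
      if PySem.Set.inter (xs.getD i []) (xs.getD j []) ≠ [] then
        pvInner fuel i (i+1) ((xs.set i (PySem.Set.union (xs.getD i []) (xs.getD j []))).eraseIdx j)
      else pvInner fuel i (j+1) xs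
    else xs

-- fuel xs.length*xs.length + xs.length + 1 dominates the inner loop's step count (proved below);
-- fuel xs.length dominates the outer loop's; with enough fuel these are exactly A's while loops
def pvOuter (fuel : Nat) (i : Nat) (xs : List (List Int)) : List (List Int) :=
  match fuel with
  | 0 => xs
  | fuel + 1 =>
    if i < xs.length then
      pvOuter fuel (i+1) (pvInner (xs.length * xs.length + xs.length + 1) i (i+1) xs)
    else xs

def get_number_and_size_of_clusters (list_of_sets : List (List Int)) : Int × List Int :=
  let xs := pvOuter (list_of_sets.map PySem.Set.ofList).length 0 (list_of_sets.map PySem.Set.ofList)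
  ((xs.length : Int), xs.map (fun s => (s.length : Int)))

-- ===== PORT B =====
-- loop body of Source B: state (merged, pos, kept); pos is the index of the first overlapping
-- cluster (None while no overlap has been seen).
def pvStepFold (st : List Int × Option Nat × List (List Int)) (c : List Int) :
    List Int × Option Nat × List (List Int) :=
  if PySem.Set.isdisjoint st.1 c then (st.1, st.2.1, st.2.2 ++ [c])
  else (PySem.Set.union st.1 c,
        (match st.2.1 with | none => some st.2.2.length | some p => some p), st.2.2)

def pvStep (clusters : List (List Int)) (s : List Int) : List (List Int) :=
  match clusters.foldl pvStepFold (PySem.Set.ofList s, none, []) with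
  | (merged, none, kept) => kept ++ [merged]
  | (merged, some p, kept) => PySem.List.insert kept (p : Int) merged

def get_number_and_size_of_clusters_alt (list_of_sets : List (List Int)) : Int × List Int :=
  let clusters := list_of_sets.foldl pvStep []
  ((clusters.length : Int), clusters.map (fun c => (c.length : Int)))

-- ===== PRECONDITION & SPEC =====
def Spec_get_number_and_size_of_clusters (list_of_sets : List (List Int)) (out : Int × List Int) : Prop := out = get_number_and_size_of_clusters_alt list_of_sets
instance (list_of_sets : List (List Int)) (out : Int × List Int) : Decidable (Spec_get_number_and_size_of_clusters list_of_sets out) := by unfold Spec_get_number_and_size_of_clusters; infer_instance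

-- ===== CLAIM (what is proved, stated in full; the proofs are below) =====
def Claim_equal_get_number_and_size_of_clusters : Prop := ∀ (list_of_sets : List (List Int)), Dom_get_number_and_size_of_clusters list_of_sets → Spec_get_number_and_size_of_clusters list_of_sets (get_number_and_size_of_clusters list_of_sets)

-- ===== LEMMAS AND PROOFS =====

-- abstraction to finite sets
def pvTF (l : List Int) : Finset Int := l.toFinset

-- classical decision helper for proof-layer filters
noncomputable def pvDec (p : Prop) : Bool := @decide p (Classical.propDecidable p)

theorem pvDec_iff (p : Prop) : pvDec p = true ↔ p := by
  unfold pvDec; exact @decide_eq_true_iff p (Classical.propDecidable p)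

theorem pv_left_sub_sup (s b : Finset Int) : s ⊆ s ⊔ b := by
  intro x hx; simp [Finset.sup_eq_union]; exact Or.inl hx

theorem pv_right_sub_sup (s b : Finset Int) : b ⊆ s ⊔ b := by
  intro x hx; simp [Finset.sup_eq_union]; exact Or.inr hx

theorem pv_sup_sub {s b U : Finset Int} (h1 : s ⊆ U) (h2 : b ⊆ U) : s ⊔ b ⊆ U := by
  rw [Finset.sup_eq_union]; exact Finset.union_subset h1 h2

-- closure theory -------------------------------------------------------------
def pvClosed (U : Finset Int) (L : List (Finset Int)) : Prop :=
  ∀ c ∈ L, ¬ Disjoint U c → c ⊆ U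

def pvStepRel (L : List (Finset Int)) (a b : Finset Int) : Prop := b ∈ L ∧ ¬ Disjoint a b

def pvConn (s : Finset Int) (L : List (Finset Int)) (c : Finset Int) : Prop :=
  c ∈ L ∧ Relation.ReflTransGen (pvStepRel L) s c

noncomputable def pvClose (s : Finset Int) (L : List (Finset Int)) : Finset Int :=
  (L.filter (fun c => pvDec (pvConn s L c))).foldr (· ⊔ ·) s

theorem pv_mem_foldr_sup (x : Int) (s : Finset Int) (l : List (Finset Int)) :
    x ∈ l.foldr (· ⊔ ·) s ↔ x ∈ s ∨ ∃ c ∈ l, x ∈ c := by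
  induction l with
  | nil => simp
  | cons c tl ih =>
      simp only [List.foldr_cons, Finset.sup_eq_union] at ih ⊢
      simp [Finset.mem_union, ih]
      tauto

theorem pv_mem_close (x : Int) (s : Finset Int) (L : List (Finset Int)) :
    x ∈ pvClose s L ↔ x ∈ s ∨ ∃ c, pvConn s L c ∧ x ∈ c := by
  unfold pvClose
  rw [pv_mem_foldr_sup]
  constructor
  · rintro (h | ⟨c, hc, hx⟩)
    · exact Or.inl h
    · obtain ⟨hcL, hd⟩ := List.mem_filter.mp hc
      exact Or.inr ⟨c, (pvDec_iff _).mp hd, hx⟩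
  · rintro (h | ⟨c, hc, hx⟩)
    · exact Or.inl h
    · exact Or.inr ⟨c, List.mem_filter.mpr ⟨hc.1, (pvDec_iff _).mpr hc⟩, hx⟩

theorem pv_subset_close (s : Finset Int) (L : List (Finset Int)) : s ⊆ pvClose s L := by
  intro x hx; exact (pv_mem_close x s L).mpr (Or.inl hx)

theorem pv_conn_subset {s c : Finset Int} {L : List (Finset Int)} (h : pvConn s L c) :
    c ⊆ pvClose s L := by
  intro x hx; exact (pv_mem_close x s L).mpr (Or.inr ⟨c, h, hx⟩)

theorem pv_close_closed (s : Finset Int) (L : List (Finset Int)) :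
    pvClosed (pvClose s L) L := by
  intro c hcL hnd
  obtain ⟨x, hxU, hxc⟩ := Finset.not_disjoint_iff.mp hnd
  rcases (pv_mem_close x s L).mp hxU with hxs | ⟨d, hd, hxd⟩
  · exact pv_conn_subset ⟨hcL, Relation.ReflTransGen.single ⟨hcL, Finset.not_disjoint_iff.mpr ⟨x, hxs, hxc⟩⟩⟩
  · exact pv_conn_subset ⟨hcL, hd.2.tail ⟨hcL, Finset.not_disjoint_iff.mpr ⟨x, hxd, hxc⟩⟩⟩

theorem pv_chain_subset {s c U : Finset Int} {L : List (Finset Int)}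
    (h : Relation.ReflTransGen (pvStepRel L) s c) (hs : s ⊆ U) (hU : pvClosed U L) :
    c ⊆ U := by
  induction h with
  | refl => exact hs
  | tail _ hbc ih =>
      obtain ⟨hmem, hnd⟩ := hbc
      obtain ⟨x, hxa, hxb⟩ := Finset.not_disjoint_iff.mp hnd
      exact hU _ hmem (Finset.not_disjoint_iff.mpr ⟨x, ih hxa, hxb⟩)

theorem pv_close_min {s U : Finset Int} {L : List (Finset Int)}
    (hs : s ⊆ U) (hU : pvClosed U L) : pvClose s L ⊆ U := by
  intro x hx
  rcases (pv_mem_close x s L).mp hx with h | ⟨c, hc, hxc⟩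
  · exact hs h
  · exact (pv_chain_subset hc.2 hs hU) hxc

theorem pv_close_eq_self {s : Finset Int} {L : List (Finset Int)}
    (h : ∀ c ∈ L, Disjoint s c) : pvClose s L = s := by
  refine Finset.Subset.antisymm (pv_close_min (Finset.Subset.refl s) ?_) (pv_subset_close s L)
  intro c hc hnd; exact absurd (h c hc) hnd

theorem pv_close_congr {s : Finset Int} {L L' : List (Finset Int)}
    (h : ∀ U, pvClosed U L ↔ pvClosed U L') : pvClose s L = pvClose s L' := by
  refine Finset.Subset.antisymm ?_ ?_
  · exact pv_close_min (pv_subset_close _ _) ((h _).mpr (pv_close_closed s L'))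
  · exact pv_close_min (pv_subset_close _ _) ((h _).mp (pv_close_closed s L))

theorem pv_close_absorb {s b : Finset Int} (hsb : ¬ Disjoint s b)
    (l1 l2 : List (Finset Int)) :
    pvClose s (l1 ++ b :: l2) = pvClose (s ⊔ b) (l1 ++ l2) := by
  refine Finset.Subset.antisymm ?_ ?_
  · refine pv_close_min (Finset.Subset.trans (pv_left_sub_sup s b) (pv_subset_close _ _)) ?_
    intro c hc hnd
    have hc' : c ∈ l1 ∨ c = b ∨ c ∈ l2 := by simpa using hc
    rcases hc' with h | h | h
    · exact pv_close_closed _ _ c (by simp [h]) hnd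
    · rw [h]; exact Finset.Subset.trans (pv_right_sub_sup s b) (pv_subset_close _ _)
    · exact pv_close_closed _ _ c (by simp [h]) hnd
  · refine pv_close_min ?_ ?_
    · have hs : s ⊆ pvClose s (l1 ++ b :: l2) := pv_subset_close _ _
      have hb : b ⊆ pvClose s (l1 ++ b :: l2) := by
        obtain ⟨x, hxs, hxb⟩ := Finset.not_disjoint_iff.mp hsb
        exact pv_close_closed _ _ b (by simp)
          (Finset.not_disjoint_iff.mpr ⟨x, hs hxs, hxb⟩)
      exact pv_sup_sub hs hb
    · intro c hc hnd
      exact pv_close_closed _ _ c (by simp at hc ⊢; tauto) hnd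

theorem pv_closed_merge {a b : Finset Int} (hab : ¬ Disjoint a b)
    (l1 l2 l3 : List (Finset Int)) (U : Finset Int) :
    pvClosed U (l1 ++ a :: (l2 ++ b :: l3)) ↔ pvClosed U (l1 ++ (a ⊔ b) :: (l2 ++ l3)) := by
  obtain ⟨x, hxa, hxb⟩ := Finset.not_disjoint_iff.mp hab
  constructor
  · intro h c hc hnd
    have hc' : c ∈ l1 ∨ c = a ⊔ b ∨ c ∈ l2 ∨ c ∈ l3 := by simpa using hc
    rcases hc' with h1 | h1 | h1 | h1
    · exact h c (by simp [h1]) hnd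
    · rw [h1] at hnd ⊢
      rcases Finset.not_disjoint_iff.mp hnd with ⟨y, hyU, hy⟩
      rcases Finset.mem_union.mp hy with hy | hy
      · have ha : a ⊆ U := h a (by simp) (Finset.not_disjoint_iff.mpr ⟨y, hyU, hy⟩)
        have hb : b ⊆ U := h b (by simp) (Finset.not_disjoint_iff.mpr ⟨x, ha hxa, hxb⟩)
        exact pv_sup_sub ha hb
      · have hb : b ⊆ U := h b (by simp) (Finset.not_disjoint_iff.mpr ⟨y, hyU, hy⟩)
        have ha : a ⊆ U := h a (by simp) (Finset.not_disjoint_iff.mpr ⟨x, hb hxb, hxa⟩)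
        exact pv_sup_sub ha hb
    · exact h c (by simp [h1]) hnd
    · exact h c (by simp [h1]) hnd
  · intro h c hc hnd
    have hc' : c ∈ l1 ∨ c = a ∨ c ∈ l2 ∨ c = b ∨ c ∈ l3 := by simpa using hc
    rcases hc' with h1 | h1 | h1 | h1 | h1
    · exact h c (by simp [h1]) hnd
    · rcases Finset.not_disjoint_iff.mp hnd with ⟨y, hyU, hy⟩
      have hsup : (a ⊔ b) ⊆ U := h (a ⊔ b) (by simp)
        (Finset.not_disjoint_iff.mpr ⟨y, hyU, Finset.mem_union.mpr (Or.inl (h1 ▸ hy))⟩)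
      rw [h1]; exact Finset.Subset.trans (pv_left_sub_sup a b) hsup
    · exact h c (by simp [h1]) hnd
    · rcases Finset.not_disjoint_iff.mp hnd with ⟨y, hyU, hy⟩
      have hsup : (a ⊔ b) ⊆ U := h (a ⊔ b) (by simp)
        (Finset.not_disjoint_iff.mpr ⟨y, hyU, Finset.mem_union.mpr (Or.inr (h1 ▸ hy))⟩)
      rw [h1]; exact Finset.Subset.trans (pv_right_sub_sup a b) hsup
    · exact h c (by simp [h1]) hnd

-- components -----------------------------------------------------------------
noncomputable def pvComps : List (Finset Int) → List (Finset Int)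
  | [] => []
  | s :: t => pvClose s t :: pvComps (t.filter (fun c => pvDec (Disjoint (pvClose s t) c)))
termination_by l => l.length
decreasing_by
  have := List.length_filter_le (fun c => pvDec (Disjoint (pvClose s t) c)) t
  simp at *; omega

theorem pvComps_nil : pvComps [] = [] := by rw [pvComps]

theorem pvComps_cons (s : Finset Int) (t : List (Finset Int)) :
    pvComps (s :: t) = pvClose s t :: pvComps (t.filter (fun c => pvDec (Disjoint (pvClose s t) c))) := by
  rw [pvComps]

theorem pvDec_eq_false_iff (p : Prop) : pvDec p = false ↔ ¬ p := by
  rw [← Bool.not_eq_true, not_iff_not]; exact pvDec_iff p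

theorem pvComps_merge (n : Nat) : ∀ (l1 l2 l3 : List (Finset Int)) (a b : Finset Int),
    l1.length + l2.length + l3.length ≤ n → ¬ Disjoint a b →
    pvComps (l1 ++ a :: (l2 ++ b :: l3)) = pvComps (l1 ++ (a ⊔ b) :: (l2 ++ l3)) := by
  induction n using Nat.strong_induction_on with
  | _ n IH =>
  intro l1 l2 l3 a b hlen hab
  obtain ⟨x, hxa, hxb⟩ := Finset.not_disjoint_iff.mp hab
  cases l1 with
  | nil =>
      simp only [List.nil_append]
      rw [pvComps_cons, pvComps_cons]
      have hclose : pvClose a (l2 ++ b :: l3) = pvClose (a ⊔ b) (l2 ++ l3) :=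
        pv_close_absorb hab l2 l3
      rw [hclose]
      congr 1
      have hbC : ¬ Disjoint (pvClose (a ⊔ b) (l2 ++ l3)) b := by
        refine Finset.not_disjoint_iff.mpr ⟨x, ?_, hxb⟩
        exact pv_subset_close _ _ (Finset.mem_union.mpr (Or.inr hxb))
      have hfb : pvDec (Disjoint (pvClose (a ⊔ b) (l2 ++ l3)) b) = false :=
        (pvDec_eq_false_iff _).mpr hbC
      simp only [List.filter_append, List.filter_cons, hfb, Bool.false_eq_true, if_false]
  | cons c l1' =>
      simp only [List.cons_append]
      rw [pvComps_cons, pvComps_cons]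
      have hC : pvClose c (l1' ++ a :: (l2 ++ b :: l3)) = pvClose c (l1' ++ (a ⊔ b) :: (l2 ++ l3)) :=
        pv_close_congr (fun U => pv_closed_merge hab l1' l2 l3 U)
      rw [hC]
      congr 1
      by_cases hda : Disjoint (pvClose c (l1' ++ (a ⊔ b) :: (l2 ++ l3))) a
      · -- the component of c avoids a and b: both survive the filter, recurse
        have hdb : Disjoint (pvClose c (l1' ++ (a ⊔ b) :: (l2 ++ l3))) b := by
          by_contra hn
          have hsub : (a ⊔ b) ⊆ pvClose c (l1' ++ (a ⊔ b) :: (l2 ++ l3)) :=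
            pv_close_closed _ _ (a ⊔ b) (by simp) (by
              obtain ⟨y, hyC, hyb⟩ := Finset.not_disjoint_iff.mp hn
              exact Finset.not_disjoint_iff.mpr ⟨y, hyC, Finset.mem_union.mpr (Or.inr hyb)⟩)
          exact Finset.not_disjoint_iff.mpr
            ⟨x, hsub (Finset.mem_union.mpr (Or.inl hxa)), hxa⟩ hda
        have hdab : Disjoint (pvClose c (l1' ++ (a ⊔ b) :: (l2 ++ l3))) (a ⊔ b) := by
          rw [Finset.sup_eq_union, Finset.disjoint_union_right]; exact ⟨hda, hdb⟩
        have ha' : pvDec (Disjoint (pvClose c (l1' ++ (a ⊔ b) :: (l2 ++ l3))) a) = true :=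
          (pvDec_iff _).mpr hda
        have hb' : pvDec (Disjoint (pvClose c (l1' ++ (a ⊔ b) :: (l2 ++ l3))) b) = true :=
          (pvDec_iff _).mpr hdb
        have hab' : pvDec (Disjoint (pvClose c (l1' ++ (a ⊔ b) :: (l2 ++ l3))) (a ⊔ b)) = true :=
          (pvDec_iff _).mpr hdab
        simp only [List.filter_append, List.filter_cons, ha', hb', hab', if_true]
        refine IH (l1'.length + l2.length + l3.length) (by simp at hlen; omega) _ _ _ _ _
          (by
            have h1 := List.length_filter_le
              (fun d => pvDec (Disjoint (pvClose c (l1' ++ (a ⊔ b) :: (l2 ++ l3))) d)) l1'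
            have h2 := List.length_filter_le
              (fun d => pvDec (Disjoint (pvClose c (l1' ++ (a ⊔ b) :: (l2 ++ l3))) d)) l2
            have h3 := List.length_filter_le
              (fun d => pvDec (Disjoint (pvClose c (l1' ++ (a ⊔ b) :: (l2 ++ l3))) d)) l3
            omega) hab
      · -- the component of c swallows a, b and a ⊔ b alike: filters agree on the nose
        have ha : a ⊆ pvClose c (l1' ++ (a ⊔ b) :: (l2 ++ l3)) := by
          rw [← hC] at hda ⊢
          exact pv_close_closed _ _ a (by simp) hda
        have hnb : ¬ Disjoint (pvClose c (l1' ++ (a ⊔ b) :: (l2 ++ l3))) b :=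
          Finset.not_disjoint_iff.mpr ⟨x, ha hxa, hxb⟩
        have hnab : ¬ Disjoint (pvClose c (l1' ++ (a ⊔ b) :: (l2 ++ l3))) (a ⊔ b) :=
          Finset.not_disjoint_iff.mpr ⟨x, ha hxa, Finset.mem_union.mpr (Or.inl hxa)⟩
        have ha' : pvDec (Disjoint (pvClose c (l1' ++ (a ⊔ b) :: (l2 ++ l3))) a) = false :=
          (pvDec_eq_false_iff _).mpr hda
        have hb' : pvDec (Disjoint (pvClose c (l1' ++ (a ⊔ b) :: (l2 ++ l3))) b) = false :=
          (pvDec_eq_false_iff _).mpr hnb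
        have hab' : pvDec (Disjoint (pvClose c (l1' ++ (a ⊔ b) :: (l2 ++ l3))) (a ⊔ b)) = false :=
          (pvDec_eq_false_iff _).mpr hnab
        simp only [List.filter_append, List.filter_cons, ha', hb', hab',
          Bool.false_eq_true, if_false]

theorem pvComps_eq_self (n : Nat) : ∀ (L : List (Finset Int)), L.length ≤ n →
    L.Pairwise (fun a b => Disjoint a b) → pvComps L = L := by
  induction n using Nat.strong_induction_on with
  | _ n IH =>
  intro L hlen hp
  cases L with
  | nil => rw [pvComps_nil]
  | cons s t =>
      rw [pvComps_cons]
      obtain ⟨hd, hp'⟩ := List.pairwise_cons.mp hp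
      have hclose : pvClose s t = s := pv_close_eq_self hd
      rw [hclose]
      have hfilt : t.filter (fun c => pvDec (Disjoint s c)) = t :=
        List.filter_eq_self.mpr (fun c hc => (pvDec_iff _).mpr (hd c hc))
      rw [hfilt]
      congr 1
      exact IH t.length (by simp at hlen; omega) t le_rfl hp'


-- bridges between PySem sets and Finsets ------------------------------------
theorem pvTF_union (a b : List Int) : pvTF (PySem.Set.union a b) = pvTF a ⊔ pvTF b := by
  apply Finset.ext; intro x
  simp [pvTF, PySem.Set.mem_union, Finset.sup_eq_union]

theorem pvTF_ofList (l : List Int) : pvTF (PySem.Set.ofList l) = pvTF l := by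
  apply Finset.ext; intro x
  simp [pvTF, PySem.Set.mem_ofList]

theorem pv_isdisjoint_true {a b : List Int} (h : PySem.Set.isdisjoint a b = true) :
    Disjoint (pvTF a) (pvTF b) := by
  refine Finset.disjoint_left.mpr ?_
  intro x hx
  have hx' : x ∈ a := by simpa [pvTF] using hx
  have := (PySem.Set.isdisjoint_iff a b).mp h x hx'
  simpa [pvTF]

theorem pv_isdisjoint_false {a b : List Int} (h : PySem.Set.isdisjoint a b = false) :
    ¬ Disjoint (pvTF a) (pvTF b) := by
  intro hd
  have ht : PySem.Set.isdisjoint a b = true := by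
    refine (PySem.Set.isdisjoint_iff a b).mpr ?_
    intro x hx hxb
    exact (Finset.disjoint_left.mp hd (by simpa [pvTF] using hx)) (by simpa [pvTF] using hxb)
  rw [h] at ht; cases ht

theorem pv_inter_ne_nil {a b : List Int} (h : PySem.Set.inter a b ≠ []) :
    ¬ Disjoint (pvTF a) (pvTF b) := by
  obtain ⟨x, hx⟩ := List.exists_mem_of_ne_nil _ h
  obtain ⟨hxa, hxb⟩ := (PySem.Set.mem_inter a b x).mp hx
  exact Finset.not_disjoint_iff.mpr ⟨x, by simpa [pvTF], by simpa [pvTF]⟩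

theorem pv_inter_eq_nil {a b : List Int} (h : ¬ PySem.Set.inter a b ≠ []) :
    Disjoint (pvTF a) (pvTF b) := by
  rw [not_not] at h
  refine Finset.disjoint_left.mpr ?_
  intro x hxa hxb
  have : x ∈ PySem.Set.inter a b := (PySem.Set.mem_inter a b x).mpr
    ⟨by simpa [pvTF] using hxa, by simpa [pvTF] using hxb⟩
  simp [h] at this

-- ===== B-side: the fold builds the canonical components =====
def pvAssemble (st : List Int × Option Nat × List (List Int)) : List (List Int) :=
  match st with
  | (merged, none, kept) => kept ++ [merged]
  | (merged, some p, kept) => kept.take p ++ merged :: kept.drop p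

def pvHist (m : Finset Int) (pos : Option Nat) (kept rest t : List (Finset Int)) :
    List (Finset Int) :=
  match pos with
  | none => kept ++ (rest ++ m :: t)
  | some p => kept.take p ++ m :: (kept.drop p ++ (rest ++ t))

theorem pvFold_pos_le : ∀ (rest : List (List Int)) (m : List Int) (pos : Option Nat)
    (kept : List (List Int)),
    (∀ p, pos = some p → p ≤ kept.length) →
    ∀ p', (rest.foldl pvStepFold (m, pos, kept)).2.1 = some p' →
      p' ≤ (rest.foldl pvStepFold (m, pos, kept)).2.2.length := by
  intro rest
  induction rest with
  | nil => intro m pos kept h p' hp'; exact h p' hp'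
  | cons c rest' ih =>
      intro m pos kept h
      simp only [List.foldl_cons, pvStepFold]
      cases hd : PySem.Set.isdisjoint m c with
      | true =>
          simp only [hd, if_true]
          exact ih _ _ _ (fun p hp => le_trans (h p hp) (by simp))
      | false =>
          simp only [hd, Bool.false_eq_true, if_false]
          refine ih _ _ _ ?_
          intro p hp
          cases pos with
          | none => simp at hp; omega
          | some q => simp at hp; exact hp ▸ h q rfl

theorem pvFold_hist : ∀ (rest : List (List Int)) (m : List Int) (pos : Option Nat)
    (kept : List (List Int)) (t : List (Finset Int)),
    (∀ p, pos = some p → p ≤ kept.length) →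
    pvComps ((pvAssemble (rest.foldl pvStepFold (m, pos, kept))).map pvTF ++ t)
      = pvComps (pvHist (pvTF m) pos (kept.map pvTF) (rest.map pvTF) t) := by
  intro rest
  induction rest with
  | nil =>
      intro m pos kept t h
      cases pos with
      | none => simp [pvAssemble, pvHist]
      | some p => simp [pvAssemble, pvHist, List.map_take, List.map_drop]
  | cons c rest' ih =>
      intro m pos kept t h
      simp only [List.foldl_cons, pvStepFold]
      cases hd : PySem.Set.isdisjoint m c with
      | true =>
          simp only [if_true]
          rw [ih m pos (kept ++ [c]) t (fun p hp => le_trans (h p hp) (by simp))]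
          congr 1
          cases pos with
          | none => simp [pvHist]
          | some p =>
              have hp : p ≤ kept.length := h p rfl
              have hp' : p ≤ (kept.map pvTF).length := by simpa using hp
              simp [pvHist, List.take_append_of_le_length hp',
                List.drop_append_of_le_length hp']
      | false =>
          simp only [Bool.false_eq_true, if_false]
          have hmc : ¬ Disjoint (pvTF m) (pvTF c) := pv_isdisjoint_false hd
          cases pos with
          | none =>
              rw [ih (PySem.Set.union m c) (some kept.length) kept t
                (by intro p hp; simp at hp; omega)]
              have hm := pvComps_merge
                ((kept.map pvTF).length + (rest'.map pvTF).length + t.length)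
                (kept.map pvTF) (rest'.map pvTF) t (pvTF c) (pvTF m) le_rfl
                (fun hdis => hmc hdis.symm)
              simp only [pvHist, List.map_cons, List.cons_append]
              rw [hm]
              simp [pvTF_union, List.take_of_length_le, List.drop_of_length_le,
                sup_comm (pvTF c) (pvTF m)]
          | some p =>
              rw [ih (PySem.Set.union m c) (some p) kept t
                (by intro q hq; simp at hq; exact hq ▸ h p rfl)]
              have hm := pvComps_merge
                (((kept.map pvTF).take p).length + ((kept.map pvTF).drop p).length
                  + (rest'.map pvTF ++ t).length)
                ((kept.map pvTF).take p) ((kept.map pvTF).drop p) (rest'.map pvTF ++ t)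
                (pvTF m) (pvTF c) le_rfl hmc
              simp only [pvHist, List.map_cons, List.cons_append]
              rw [hm]
              simp [pvTF_union]


theorem pvStep_eq_assemble (acc : List (List Int)) (s : List Int) :
    pvStep acc s = pvAssemble (acc.foldl pvStepFold (PySem.Set.ofList s, none, [])) := by
  unfold pvStep pvAssemble
  rcases hst : acc.foldl pvStepFold (PySem.Set.ofList s, none, []) with ⟨m', pos', kept'⟩
  cases pos' with
  | none => rfl
  | some p =>
      have hle : p ≤ kept'.length := by
        have := pvFold_pos_le acc (PySem.Set.ofList s) none [] (by intro q hq; cases hq) p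
        rw [hst] at this
        exact this rfl
      simp [PySem.List.insert_natCast kept' p m' hle]

theorem pvStep_hist (acc : List (List Int)) (s : List Int) (t : List (Finset Int)) :
    pvComps ((pvStep acc s).map pvTF ++ t) = pvComps (acc.map pvTF ++ (pvTF s :: t)) := by
  rw [pvStep_eq_assemble]
  rw [pvFold_hist acc (PySem.Set.ofList s) none [] t (by intro q hq; cases hq)]
  simp [pvHist, pvTF_ofList]

theorem pvFoldl_comps : ∀ (ts acc : List (List Int)),
    pvComps ((ts.foldl pvStep acc).map pvTF) = pvComps (acc.map pvTF ++ ts.map pvTF) := by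
  intro ts
  induction ts with
  | nil => intro acc; simp
  | cons s ts' ih =>
      intro acc
      rw [List.foldl_cons, ih (pvStep acc s)]
      have := pvStep_hist acc s (ts'.map pvTF)
      rw [← List.append_nil ((pvStep acc s).map pvTF)] at this
      simp only [List.append_nil] at this
      rw [this]
      simp

-- pairwise-disjointness and nodup invariants of the B fold
theorem pvFold_inv : ∀ (rest : List (List Int)) (m : List Int) (pos : Option Nat)
    (kept : List (List Int)),
    m.Nodup → (∀ k ∈ kept, k.Nodup) → (∀ k ∈ rest, k.Nodup) →
    ((kept ++ rest).map pvTF).Pairwise Disjoint →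
    (∀ k ∈ kept, Disjoint (pvTF m) (pvTF k)) →
    (rest.foldl pvStepFold (m, pos, kept)).1.Nodup ∧
    (∀ k ∈ (rest.foldl pvStepFold (m, pos, kept)).2.2, k.Nodup) ∧
    (((rest.foldl pvStepFold (m, pos, kept)).2.2).map pvTF).Pairwise Disjoint ∧
    (∀ k ∈ (rest.foldl pvStepFold (m, pos, kept)).2.2,
      Disjoint (pvTF (rest.foldl pvStepFold (m, pos, kept)).1) (pvTF k)) := by
  intro rest
  induction rest with
  | nil =>
      intro m pos kept hm hk _ hpw hdk
      refine ⟨hm, hk, ?_, hdk⟩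
      simpa using hpw
  | cons c rest' ih =>
      intro m pos kept hm hk hr hpw hdk
      simp only [List.foldl_cons, pvStepFold]
      cases hd : PySem.Set.isdisjoint m c with
      | true =>
          simp only [if_true]
          refine ih m pos (kept ++ [c]) hm ?_ ?_ ?_ ?_
          · intro k hk'
            rcases List.mem_append.mp hk' with h1 | h1
            · exact hk k h1
            · simp at h1; exact h1 ▸ hr c (by simp)
          · intro k hk'; exact hr k (by simp [hk'])
          · have : (kept ++ [c]) ++ rest' = kept ++ (c :: rest') := by simp
            rw [this]
            simpa using hpw
          · intro k hk'
            rcases List.mem_append.mp hk' with h1 | h1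
            · exact hdk k h1
            · simp at h1; exact h1 ▸ pv_isdisjoint_true hd
      | false =>
          simp only [Bool.false_eq_true, if_false]
          refine ih (PySem.Set.union m c) _ kept
            (PySem.Set.nodup_union m c hm) hk (fun k hk' => hr k (by simp [hk'])) ?_ ?_
          · have hsub : List.Sublist (kept ++ rest') (kept ++ c :: rest') :=
              List.Sublist.append_left (List.sublist_cons_self c rest') kept
            exact hpw.sublist (hsub.map pvTF)
          · intro k hk'
            rw [pvTF_union, Finset.sup_eq_union, Finset.disjoint_union_left]
            refine ⟨hdk k hk', ?_⟩
            rw [List.map_append] at hpw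
            have hsplit := (List.pairwise_append.mp hpw).2.2
            exact (hsplit (pvTF k) (List.mem_map_of_mem hk')
              (pvTF c) (by simp)).symm

theorem pvStep_inv (acc : List (List Int)) (s : List Int)
    (hn : ∀ c ∈ acc, c.Nodup) (hpw : (acc.map pvTF).Pairwise Disjoint) :
    (∀ c ∈ pvStep acc s, c.Nodup) ∧ ((pvStep acc s).map pvTF).Pairwise Disjoint := by
  rw [pvStep_eq_assemble]
  obtain ⟨h1, h2, h3, h4⟩ := pvFold_inv acc (PySem.Set.ofList s) none []
    (PySem.Set.nodup_ofList s) (by simp) hn (by simpa using hpw) (by simp)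
  rcases hst : acc.foldl pvStepFold (PySem.Set.ofList s, none, []) with ⟨m', pos', kept'⟩
  rw [hst] at h1 h2 h3 h4
  simp only at h1 h2 h3 h4
  cases pos' with
  | none =>
      simp only [pvAssemble]
      constructor
      · intro c hc
        rcases List.mem_append.mp hc with h | h
        · exact h2 c h
        · simp at h; exact h ▸ h1
      · rw [List.map_append]
        refine List.pairwise_append.mpr ⟨h3, by simp, ?_⟩
        intro x hx y hy
        simp at hy
        obtain ⟨k, hk, rfl⟩ := List.mem_map.mp hx
        exact hy ▸ (h4 k hk).symm
  | some p =>
      simp only [pvAssemble]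
      constructor
      · intro c hc
        rcases List.mem_append.mp hc with h | h
        · exact h2 c (List.take_subset p kept' h)
        · rcases List.mem_cons.mp h with h | h
          · exact h ▸ h1
          · exact h2 c (List.drop_subset p kept' h)
      · have hperm : List.Perm
            ((kept'.take p ++ m' :: kept'.drop p).map pvTF)
            (pvTF m' :: kept'.map pvTF) := by
          rw [List.map_append, List.map_cons]
          refine List.Perm.trans List.perm_middle ?_
          rw [← List.map_append, List.take_append_drop]
        refine (List.Perm.pairwise_iff (fun {_ _} h => Disjoint.symm h) hperm).mpr ?_
        refine List.pairwise_cons.mpr ⟨?_, h3⟩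
        intro y hy
        obtain ⟨k, hk, rfl⟩ := List.mem_map.mp hy
        exact h4 k hk

theorem pvFoldl_inv : ∀ (ts acc : List (List Int)),
    (∀ c ∈ acc, c.Nodup) → ((acc.map pvTF).Pairwise Disjoint) →
    (∀ c ∈ ts.foldl pvStep acc, c.Nodup) ∧
    (((ts.foldl pvStep acc).map pvTF).Pairwise Disjoint) := by
  intro ts
  induction ts with
  | nil => intro acc h1 h2; exact ⟨h1, h2⟩
  | cons s ts' ih =>
      intro acc h1 h2
      rw [List.foldl_cons]
      obtain ⟨h1', h2'⟩ := pvStep_inv acc s h1 h2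
      exact ih (pvStep acc s) h1' h2'


-- ===== A-side: the restart scan computes closures =====
def pvScan : List Int → List (List Int) → List (List Int) → List Int × List (List Int)
  | g, done, [] => (g, done)
  | g, done, c :: tl =>
    if PySem.Set.inter g c ≠ [] then pvScan (PySem.Set.union g c) [] (done ++ tl)
    else pvScan g (done ++ [c]) tl
termination_by g done todo => (done.length + todo.length, todo.length)
decreasing_by
  · apply Prod.Lex.left
    simp
  · have heq : (done ++ [c]).length + tl.length = done.length + (c :: tl).length := by
      simp; omega
    rw [heq]
    apply Prod.Lex.right
    simp

theorem pv_getD_append (pre : List (List Int)) (x : List Int) (l : List (List Int)) :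
    (pre ++ x :: l).getD pre.length [] = x := by
  induction pre with
  | nil => rfl
  | cons a pre ih => simpa using ih

theorem pv_set_append (pre : List (List Int)) (x v : List Int) (l : List (List Int)) :
    (pre ++ x :: l).set pre.length v = pre ++ v :: l := by
  induction pre with
  | nil => rfl
  | cons a pre ih => simpa using ih

theorem pv_eraseIdx_append (l1 : List (List Int)) (x : List Int) (l2 : List (List Int)) :
    (l1 ++ x :: l2).eraseIdx l1.length = l1 ++ l2 := by
  induction l1 with
  | nil => rfl
  | cons a l1 ih => simpa using ih

theorem pvInner_eq_scan : ∀ (g : List Int) (done todo : List (List Int))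
    (pre : List (List Int)) (fuel : Nat),
    (done.length + todo.length) * (done.length + todo.length) + todo.length < fuel →
    pvInner fuel pre.length (pre ++ g :: done).length (pre ++ g :: (done ++ todo))
      = pre ++ (pvScan g done todo).1 :: (pvScan g done todo).2 := by
  intro g done todo
  fun_induction pvScan g done todo with
  | case1 g done =>
      intro pre fuel hfuel
      cases fuel with
      | zero => omega
      | succ fuel =>
          rw [pvInner]
          rw [if_neg (by simp)]
          simp
  | case2 g done c tl hcond ih =>
      intro pre fuel hfuel
      cases fuel with
      | zero => omega
      | succ fuel =>
      rw [pvInner]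
      rw [if_pos (by simp)]
      have hg : (pre ++ g :: (done ++ c :: tl)).getD pre.length [] = g :=
        pv_getD_append pre g _
      have hass : pre ++ g :: (done ++ c :: tl) = (pre ++ g :: done) ++ (c :: tl) := by simp
      have hc : (pre ++ g :: (done ++ c :: tl)).getD (pre ++ g :: done).length [] = c := by
        rw [hass]; exact pv_getD_append _ c tl
      rw [hg, hc, if_pos hcond]
      have hset : (pre ++ g :: (done ++ c :: tl)).set pre.length (PySem.Set.union g c)
          = pre ++ PySem.Set.union g c :: (done ++ c :: tl) := pv_set_append pre g _ _
      rw [hset]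
      have hass2 : pre ++ PySem.Set.union g c :: (done ++ c :: tl)
          = (pre ++ PySem.Set.union g c :: done) ++ (c :: tl) := by simp
      have hlen2 : (pre ++ g :: done).length = (pre ++ PySem.Set.union g c :: done).length := by
        simp
      have herase : (pre ++ PySem.Set.union g c :: (done ++ c :: tl)).eraseIdx
          (pre ++ g :: done).length = pre ++ PySem.Set.union g c :: (done ++ tl) := by
        rw [hass2, hlen2, pv_eraseIdx_append]
        simp
      rw [herase]
      have hfuel' : (([] : List (List Int)).length + (done ++ tl).length)
          * (([] : List (List Int)).length + (done ++ tl).length) + (done ++ tl).length < fuel := by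
        simp only [List.length_nil, List.length_append, List.length_cons, Nat.zero_add] at hfuel ⊢
        have h1 : done.length + (tl.length + 1) = (done.length + tl.length) + 1 := by omega
        rw [h1] at hfuel
        have e1 : ((done.length + tl.length) + 1) * ((done.length + tl.length) + 1)
            = (done.length + tl.length) * (done.length + tl.length)
              + 2 * (done.length + tl.length) + 1 := by ring
        omega
      have := ih pre fuel hfuel'
      simp only [List.nil_append, List.append_nil] at this
      have hj : pre.length + 1 = (pre ++ PySem.Set.union g c :: ([] : List (List Int))).length := by
        simp
      rw [hj]
      simpa using this
  | case3 g done c tl hcond ih =>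
      intro pre fuel hfuel
      cases fuel with
      | zero => omega
      | succ fuel =>
      rw [pvInner]
      rw [if_pos (by simp)]
      have hg : (pre ++ g :: (done ++ c :: tl)).getD pre.length [] = g :=
        pv_getD_append pre g _
      have hass : pre ++ g :: (done ++ c :: tl) = (pre ++ g :: done) ++ (c :: tl) := by simp
      have hc : (pre ++ g :: (done ++ c :: tl)).getD (pre ++ g :: done).length [] = c := by
        rw [hass]; exact pv_getD_append _ c tl
      rw [hg, hc, if_neg hcond]
      have hfuel' : ((done ++ [c]).length + tl.length) * ((done ++ [c]).length + tl.length)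
          + tl.length < fuel := by
        simp only [List.length_append, List.length_cons, List.length_nil] at hfuel ⊢
        have heq : done.length + 1 + tl.length = done.length + (tl.length + 1) := by omega
        rw [heq]
        omega
      have := ih pre fuel hfuel'
      have hj : (pre ++ g :: done).length + 1 = (pre ++ g :: (done ++ [c])).length := by
        simp; omega
      have hlist : pre ++ g :: (done ++ c :: tl) = pre ++ g :: ((done ++ [c]) ++ tl) := by
        simp
      rw [hj, hlist]
      exact this


theorem pvScan_spec : ∀ (g : List Int) (done todo : List (List Int)),
    (∀ d ∈ done, Disjoint (pvTF g) (pvTF d)) →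
    pvTF (pvScan g done todo).1 = pvClose (pvTF g) ((done ++ todo).map pvTF)
    ∧ (pvScan g done todo).2
        = (done ++ todo).filter (fun c => pvDec (Disjoint (pvTF (pvScan g done todo).1) (pvTF c)))
    ∧ (g.Nodup → (pvScan g done todo).1.Nodup) := by
  intro g done todo
  fun_induction pvScan g done todo with
  | case1 g done =>
      intro h
      refine ⟨?_, ?_, fun hn => hn⟩
      · rw [List.append_nil]
        exact (pv_close_eq_self (by
          intro c hc
          obtain ⟨d, hd, rfl⟩ := List.mem_map.mp hc
          exact h d hd)).symm
      · rw [List.append_nil]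
        exact (List.filter_eq_self.mpr (fun d hd => (pvDec_iff _).mpr (h d hd))).symm
  | case2 g done c tl hcond ih =>
      intro h
      have hgc : ¬ Disjoint (pvTF g) (pvTF c) := pv_inter_ne_nil hcond
      obtain ⟨x, hxg, hxc⟩ := Finset.not_disjoint_iff.mp hgc
      obtain ⟨ih1, ih2, ih3⟩ := ih (by simp)
      have habs : pvClose (pvTF g) ((done ++ c :: tl).map pvTF)
          = pvClose (pvTF g ⊔ pvTF c) ((done ++ tl).map pvTF) := by
        have := pv_close_absorb hgc (done.map pvTF) (tl.map pvTF)
        simpa using this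
      have h1 : pvTF (pvScan (PySem.Set.union g c) [] (done ++ tl)).1
          = pvClose (pvTF g) ((done ++ c :: tl).map pvTF) := by
        rw [ih1, habs]
        simp [pvTF_union]
      refine ⟨h1, ?_, fun hn => ih3 (PySem.Set.nodup_union g c hn)⟩
      have hcC : ¬ Disjoint (pvTF (pvScan (PySem.Set.union g c) [] (done ++ tl)).1) (pvTF c) := by
        rw [ih1]
        refine Finset.not_disjoint_iff.mpr ⟨x, ?_, hxc⟩
        refine pv_subset_close _ _ ?_
        rw [pvTF_union, Finset.sup_eq_union]
        exact Finset.mem_union_right _ hxc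
      have hfc : pvDec (Disjoint (pvTF (pvScan (PySem.Set.union g c) [] (done ++ tl)).1)
          (pvTF c)) = false := (pvDec_eq_false_iff _).mpr hcC
      rw [ih2]
      simp only [List.nil_append, List.filter_append, List.filter_cons, hfc,
        Bool.false_eq_true, if_false]
  | case3 g done c tl hcond ih =>
      intro h
      have hgc : Disjoint (pvTF g) (pvTF c) := pv_inter_eq_nil hcond
      obtain ⟨ih1, ih2, ih3⟩ := ih (by
        intro d hd
        rcases List.mem_append.mp hd with h1 | h1
        · exact h d h1
        · simp at h1; exact h1 ▸ hgc)
      have hll : (done ++ [c]) ++ tl = done ++ c :: tl := by simp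
      rw [hll] at ih1 ih2
      exact ⟨ih1, ih2, ih3⟩


theorem pvOuter_comps : ∀ (n : Nat) (rest pre : List (List Int)) (fuel : Nat),
    rest.length ≤ n → rest.length ≤ fuel →
    (∀ c ∈ rest, c.Nodup) →
    ∃ out, pvOuter fuel pre.length (pre ++ rest) = pre ++ out
      ∧ out.map pvTF = pvComps (rest.map pvTF)
      ∧ ∀ c ∈ out, c.Nodup := by
  intro n
  induction n using Nat.strong_induction_on with
  | _ n IH =>
  intro rest pre fuel hlen hfuel hnd
  cases rest with
  | nil =>
      refine ⟨[], ?_, by simp [pvComps_nil], by simp⟩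
      cases fuel with
      | zero => simp [pvOuter]
      | succ fuel => rw [pvOuter, if_neg (by simp)]
  | cons s t =>
      cases fuel with
      | zero => simp at hfuel
      | succ fuel =>
      rw [pvOuter, if_pos (by simp)]
      have h1 : pre.length + 1 = (pre ++ s :: ([] : List (List Int))).length := by simp
      have h2 : pre ++ s :: t = pre ++ s :: (([] : List (List Int)) ++ t) := by simp
      have hfin : (([] : List (List Int)).length + t.length)
          * (([] : List (List Int)).length + t.length) + t.length
          < (pre ++ s :: (([] : List (List Int)) ++ t)).length
            * (pre ++ s :: (([] : List (List Int)) ++ t)).length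
            + (pre ++ s :: (([] : List (List Int)) ++ t)).length + 1 := by
        simp only [List.length_nil, List.length_append, List.length_cons, Nat.zero_add]
        have hTL : t.length ≤ pre.length + (t.length + 1) := by omega
        have hsq : t.length * t.length
            ≤ (pre.length + (t.length + 1)) * (pre.length + (t.length + 1)) :=
          Nat.mul_le_mul hTL hTL
        omega
      rw [h1, h2, pvInner_eq_scan s [] t pre _ hfin]
      obtain ⟨hs1, hs2, hs3⟩ := pvScan_spec s [] t (by simp)
      simp only [List.nil_append] at hs1 hs2
      have hlen2 : (pvScan s [] t).2.length ≤ t.length := by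
        rw [hs2]; exact List.length_filter_le _ t
      have hnd2 : ∀ c ∈ (pvScan s [] t).2, c.Nodup := by
        intro c hc
        rw [hs2] at hc
        exact hnd c (List.mem_cons_of_mem s (List.mem_of_mem_filter hc))
      have hlist : pre ++ (pvScan s [] t).1 :: (pvScan s [] t).2
          = (pre ++ [(pvScan s [] t).1]) ++ (pvScan s [] t).2 := by simp
      have hplen : (pre ++ s :: ([] : List (List Int))).length
          = (pre ++ [(pvScan s [] t).1]).length := by simp
      rw [hlist, hplen]
      obtain ⟨out', ho1, ho2, ho3⟩ := IH t.length (by simp at hlen; omega)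
        (pvScan s [] t).2 (pre ++ [(pvScan s [] t).1]) fuel hlen2
        (by simp at hfuel; omega) hnd2
      refine ⟨(pvScan s [] t).1 :: out', ?_, ?_, ?_⟩
      · rw [ho1]; simp
      · rw [List.map_cons, ho2, List.map_cons, pvComps_cons, hs1, hs2, List.filter_map]
        simp only [Function.comp_def, hs1]
      · intro c hc
        rcases List.mem_cons.mp hc with h | h
        · exact h ▸ hs3 (hnd s (by simp))
        · exact ho3 c h

-- ===== VERDICT (by name: the statement is the Claim_ definition above) =====
theorem pv_map_len_eq : ∀ (l1 l2 : List (List Int)), l1.map pvTF = l2.map pvTF →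
    (∀ c ∈ l1, c.Nodup) → (∀ c ∈ l2, c.Nodup) →
    l1.map (fun c => (c.length : Int)) = l2.map (fun c => (c.length : Int)) := by
  intro l1
  induction l1 with
  | nil =>
      intro l2 h _ _
      have : l2.map pvTF = [] := h.symm
      rw [List.map_eq_nil_iff] at this
      rw [this]
  | cons a l1' ih =>
      intro l2 h hn1 hn2
      cases l2 with
      | nil => simp at h
      | cons b l2' =>
          simp only [List.map_cons, List.cons.injEq] at h
          obtain ⟨hab, htail⟩ := h
          have hlen : a.length = b.length := by
            rw [← List.toFinset_card_of_nodup (hn1 a (by simp)),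
              ← List.toFinset_card_of_nodup (hn2 b (by simp))]
            unfold pvTF at hab
            rw [hab]
          simp only [List.map_cons, hlen]
          rw [ih l2' htail (fun c hc => hn1 c (by simp [hc]))
            (fun c hc => hn2 c (by simp [hc]))]

theorem get_number_and_size_of_clusters_spec : Claim_equal_get_number_and_size_of_clusters := by
  intro l _
  unfold Spec_get_number_and_size_of_clusters
  unfold get_number_and_size_of_clusters get_number_and_size_of_clusters_alt
  obtain ⟨out, ho1, ho2, ho3⟩ := pvOuter_comps (l.map PySem.Set.ofList).length
    (l.map PySem.Set.ofList) [] (l.map PySem.Set.ofList).length le_rfl le_rfl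
    (by
      intro c hc
      obtain ⟨d, _, rfl⟩ := List.mem_map.mp hc
      exact PySem.Set.nodup_ofList d)
  have hA : pvOuter (l.map PySem.Set.ofList).length 0 (l.map PySem.Set.ofList) = out := by
    simpa using ho1
  obtain ⟨hbn, hbpw⟩ := pvFoldl_inv l [] (by simp) (by simp)
  have hBc : pvComps ((l.foldl pvStep []).map pvTF) = pvComps (l.map pvTF) := by
    have := pvFoldl_comps l []
    simpa using this
  have hBeq : (l.foldl pvStep []).map pvTF = pvComps (l.map pvTF) := by
    rw [← hBc]
    exact (pvComps_eq_self ((l.foldl pvStep []).map pvTF).length _ le_rfl hbpw).symm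
  have hAeq : out.map pvTF = pvComps (l.map pvTF) := by
    rw [ho2]
    congr 1
    rw [List.map_map]
    exact List.map_congr_left (fun c _ => pvTF_ofList c)
  have hmap : out.map pvTF = (l.foldl pvStep []).map pvTF := by rw [hAeq, hBeq]
  have hlen : out.length = (l.foldl pvStep []).length := by
    have := congrArg List.length hmap
    simpa using this
  rw [hA]
  refine Prod.ext ?_ ?_
  · simpa using hlen
  · exact pv_map_len_eq out (l.foldl pvStep []) hmap ho3 hbn
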